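-- pv_equiv track=rewrite | github.com/duyminh1998/cellular-automata | QAM/qam.py | count_repeats
-- ===== SOURCE A (Python) =====
-- def count_repeats(constellation_diagram) -> int:
--     """
--     Description:
--         Count the number of repeated constellation points in the constellation diagram.
--
--     Arguments:
--         constellation_diagram: the constellation diagram.
--
--     Return:
--         (int) the number of repeated constellation points.
--     """
--     const_dic = {}
--     for const_pt_x in range(len(constellation_diagram)):
--         for const_pt_y in range(len(constellation_diagram[const_pt_x])):
--             const_pt = constellation_diagram[const_pt_x][const_pt_y]
--             if const_pt:
--                 if const_pt not in const_dic.keys():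
--                     const_dic[const_pt] = 1
--                 else:
--                     const_dic[const_pt] = const_dic[const_pt] + 1
--     return sum(1 for v in const_dic.values() if v > 1)
-- ===== SOURCE B (Python) =====
-- def count_repeats(constellation_diagram) -> int:
--     # Sort the truthy points; equal points become adjacent, so repeated
--     # points are exactly the runs of length >= 2, counted in one scan.
--     pts = sorted(pt for row in constellation_diagram for pt in row if pt)
--     total = 0
--     run_len = 0
--     prev = None
--     for pt in pts:
--         if pt == prev:
--             run_len += 1
--             if run_len == 2:
--                 total += 1
--         else:
--             prev = pt
--             run_len = 1
--     return total
-- ===== Notes on version B (the rewrite author's own statement) =====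
-- stated objective: alternative
-- what changed: Replaces A's hash-counting (build a point->frequency dict over index-based loops, then a second pass filtering values > 1) by a sort-then-scan algorithm: flatten the truthy points, sort them so equal points are adjacent, and count runs of length >= 2 in one linear scan with no frequency table.
import Mathlib
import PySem

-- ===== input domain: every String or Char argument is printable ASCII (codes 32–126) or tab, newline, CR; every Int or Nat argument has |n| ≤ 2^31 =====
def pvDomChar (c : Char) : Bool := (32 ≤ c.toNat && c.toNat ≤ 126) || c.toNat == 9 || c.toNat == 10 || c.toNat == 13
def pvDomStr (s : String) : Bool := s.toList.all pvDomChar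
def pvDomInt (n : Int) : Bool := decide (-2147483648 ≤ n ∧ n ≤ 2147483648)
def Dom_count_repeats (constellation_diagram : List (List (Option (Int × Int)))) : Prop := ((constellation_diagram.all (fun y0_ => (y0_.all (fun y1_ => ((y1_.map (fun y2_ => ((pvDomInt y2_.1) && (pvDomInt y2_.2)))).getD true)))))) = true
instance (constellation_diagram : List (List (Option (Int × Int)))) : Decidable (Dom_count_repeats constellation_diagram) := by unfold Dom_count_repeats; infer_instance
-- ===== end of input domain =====

-- B replaces A's frequency-dict counting (index-based double loop building point->count, then a pass
-- filtering counts > 1) by a sort-then-scan algorithm: sort the truthy points so equal points are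
-- adjacent and count runs of length >= 2 in one scan; alternative algorithm, same results.
-- ===== PORT A =====
-- the body of A's inner loop for one cell: `if const_pt:` (None is falsy, a pair is always truthy), then the dict update
def pvACell (d2 : PySem.Dict (Int × Int) Int) (const_pt : Option (Int × Int)) : PySem.Dict (Int × Int) Int :=
  match const_pt with
  | none => d2
  | some const_pt =>
    if d2.contains const_pt = false then d2.insert const_pt 1
    else d2.insert const_pt (d2.getD const_pt 0 + 1)

def count_repeats (constellation_diagram : List (List (Option (Int × Int)))) : Int :=
  let const_dic : PySem.Dict (Int × Int) Int :=
    (PySem.List.pyRange 0 (constellation_diagram.length : Int) 1).foldl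
      (fun d const_pt_x =>
        (PySem.List.pyRange 0 ((PySem.List.pyGetD constellation_diagram const_pt_x []).length : Int) 1).foldl
          (fun d2 const_pt_y =>
            pvACell d2 (PySem.List.pyGetD (PySem.List.pyGetD constellation_diagram const_pt_x []) const_pt_y none))
          d)
      PySem.Dict.empty
  const_dic.values.foldl (fun acc v => if v > 1 then acc + 1 else acc) 0

-- ===== PORT B =====
-- the body of B's loop for one sorted point: state (total, run_len, prev)
def pvBScan (st : Int × Int × Option (Int × Int)) (pt : Int × Int) : Int × Int × Option (Int × Int) :=
  match st with
  | (total, run_len, prev) =>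
    if some pt == prev then
      (if run_len + 1 == 2 then total + 1 else total, run_len + 1, prev)
    else
      (total, 1, some pt)

def count_repeats_alt (constellation_diagram : List (List (Option (Int × Int)))) : Int :=
  -- pts = sorted(pt for row in constellation_diagram for pt in row if pt)  (tuple sort = lexicographic)
  let pts := PySem.List.sorted2 (constellation_diagram.flatMap (fun row => row.filterMap id)) Prod.fst Prod.snd
  (pts.foldl pvBScan (0, 0, none)).1

-- ===== PRECONDITION & SPEC =====
def Spec_count_repeats (constellation_diagram : List (List (Option (Int × Int)))) (out : Int) : Prop := out = count_repeats_alt constellation_diagram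
instance (constellation_diagram : List (List (Option (Int × Int)))) (out : Int) : Decidable (Spec_count_repeats constellation_diagram out) := by unfold Spec_count_repeats; infer_instance

-- ===== CLAIM (what is proved, stated in full; the proofs are below) =====
def Claim_equal_count_repeats : Prop := ∀ (constellation_diagram : List (List (Option (Int × Int)))), Dom_count_repeats constellation_diagram → Spec_count_repeats constellation_diagram (count_repeats constellation_diagram)

-- ===== LEMMAS AND PROOFS =====

-- the truthy points of the grid, in traversal order (proof-side only)
def pvPts (cd : List (List (Option (Int × Int)))) : List (Int × Int) := cd.flatten.filterMap id

-- the common characterisation: number of distinct points of s occurring at least twice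
def pvN (s : List (Int × Int)) : Int :=
  (((PySem.Set.ofList s).filter (fun k => 2 ≤ s.count k)).length : Int)

-- skipping `none` cells in a fold is a fold over the `some` payloads
theorem pv_foldl_skip_none {α β : Type} (g : β → Option α → β) (f : β → α → β)
    (hnone : ∀ acc, g acc none = acc) (hsome : ∀ acc x, g acc (some x) = f acc x)
    (l : List (Option α)) (init : β) :
    l.foldl g init = (l.filterMap id).foldl f init := by
  induction l generalizing init with
  | nil => rfl
  | cons o t ih => cases o <;> simp [ih, hnone, hsome]

theorem pv_getD_of_not_contains {κ ν : Type} [BEq κ] (d : PySem.Dict κ ν) (k : κ) (dflt : ν)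
    (h : d.contains k = false) : d.getD k dflt = dflt := by
  obtain ⟨items⟩ := d
  induction items with
  | nil => rfl
  | cons p t ih =>
    simp [PySem.Dict.contains] at h
    simp [PySem.Dict.getD, PySem.Dict.get?, h.1]
    have := ih (by simp [PySem.Dict.contains]; exact h.2)
    simpa [PySem.Dict.getD] using this

-- A's per-cell dict update on a truthy cell is exactly Counter's update step
theorem pv_ACell_eq_modify (d : PySem.Dict (Int × Int) Int) (pt : Int × Int) :
    pvACell d (some pt) = d.modify pt 0 (· + 1) := by
  show (if d.contains pt = false then d.insert pt 1 else d.insert pt (d.getD pt 0 + 1)) = _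
  by_cases h : d.contains pt = false
  · simp [h, PySem.Dict.modify, pv_getD_of_not_contains d pt 0 h]
  · simp [h, PySem.Dict.modify]

-- A computes the number of distinct truthy points occurring more than once
theorem pv_A_char (cd : List (List (Option (Int × Int)))) :
    count_repeats cd = pvN (pvPts cd) := by
  unfold count_repeats pvN
  dsimp only
  rw [PySem.List.foldl_pyRange_zero_pyGetD' cd []
        (fun d row =>
          (PySem.List.pyRange 0 ((row : List (Option (Int × Int))).length : Int) 1).foldl
            (fun d2 const_pt_y => pvACell d2 (PySem.List.pyGetD row const_pt_y none)) d)
        PySem.Dict.empty]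
  rw [PySem.List.foldl_congr_mem cd _ (fun d row => row.foldl pvACell d) PySem.Dict.empty
        (fun d row _ => PySem.List.foldl_pyRange_zero_pyGetD' row none pvACell d)]
  rw [← List.foldl_flatten]
  have hskip : cd.flatten.foldl pvACell PySem.Dict.empty
      = (cd.flatten.filterMap id).foldl (fun d pt => d.modify pt 0 (· + 1)) PySem.Dict.empty :=
    pv_foldl_skip_none pvACell (fun d pt => d.modify pt 0 (· + 1))
      (fun _ => rfl) (fun d pt => pv_ACell_eq_modify d pt) cd.flatten PySem.Dict.empty
  rw [hskip, ← PySem.Dict.counter_eq_foldl]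
  rw [PySem.List.foldl_ite_add_one (fun v => v > 1) _ 0]
  have hv : (PySem.Dict.counter (cd.flatten.filterMap id)).values
      = (PySem.Set.ofList (pvPts cd)).map (fun k => ((pvPts cd).count k : Int)) := by
    show (PySem.Dict.counter (cd.flatten.filterMap id)).items.map (·.2) = _
    rw [PySem.Dict.items_counter]
    simp [pvPts]
  rw [hv, List.countP_map]
  have hp : List.countP ((fun v => decide (v > 1)) ∘ fun k => ((pvPts cd).count k : Int)) (PySem.Set.ofList (pvPts cd))
      = List.countP (fun k => decide (2 ≤ (pvPts cd).count k)) (PySem.Set.ofList (pvPts cd)) := by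
    apply List.countP_congr
    intro k _
    simp only [Function.comp]
    constructor <;> intro h <;> simp_all <;> omega
  rw [hp, List.countP_eq_length_filter]
  simp

-- ---- B side: the sorted list is "chunked" (equal elements contiguous, blocks pairwise distinct) ----

-- the lexicographic sort key Python uses on tuples
def pvKey (p : Int × Int) : Int ×ₗ Int := toLex p

theorem pv_key_inj {a b : Int × Int} (h : pvKey a = pvKey b) : a = b := by
  simpa [pvKey] using h

-- sorted2 with fst/snd keys is insertion sort under the lexicographic key
theorem pv_sorted2_eq (xs : List (Int × Int)) :
    PySem.List.sorted2 xs Prod.fst Prod.snd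
      = xs.foldl (fun acc x => PySem.List.insertBy (fun a b => decide (pvKey a < pvKey b)) x acc) [] := by
  show xs.foldl (fun acc x => PySem.List.insertBy
      (fun a b => decide (a.1 < b.1) || (!decide (b.1 < a.1) && decide (a.2 < b.2))) x acc) [] = _
  have hbe : (fun a b : Int × Int => decide (a.1 < b.1) || (!decide (b.1 < a.1) && decide (a.2 < b.2)))
      = (fun a b => decide (pvKey a < pvKey b)) := by
    funext a b
    have hlex : (pvKey a < pvKey b) ↔ (a.1 < b.1 ∨ a.1 = b.1 ∧ a.2 < b.2) := by
      simp [pvKey, Prod.Lex.toLex_lt_toLex]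
    rcases lt_trichotomy a.1 b.1 with h | h | h
    · simp [h, hlex, asymm h]
    · simp [h, hlex]
    · have h1 : ¬ a.1 < b.1 := by omega
      have h2 : ¬ a.1 = b.1 := by omega
      simp [h, h1, h2, hlex]
  rw [hbe]

theorem pv_sorted2_pairwise (xs : List (Int × Int)) :
    (PySem.List.sorted2 xs Prod.fst Prod.snd).Pairwise (fun a b => pvKey a ≤ pvKey b) := by
  rw [pv_sorted2_eq]
  have h : ∀ (l acc : List (Int × Int)), acc.Pairwise (fun a b => pvKey a ≤ pvKey b) →
      (l.foldl (fun acc x => PySem.List.insertBy (fun a b => decide (pvKey a < pvKey b)) x acc) acc).Pairwise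
        (fun a b => pvKey a ≤ pvKey b) := by
    intro l
    induction l with
    | nil => exact fun acc h => h
    | cons x t ih => exact fun acc h => ih _ (PySem.List.insertBy_pairwise_le pvKey x acc h)
  exact h xs [] (List.Pairwise.nil)

-- equal elements contiguous: a sorted list is a concatenation of constant blocks with distinct values
inductive pvChunked : List (Int × Int) → Prop
  | nil : pvChunked []
  | cons (k : Nat) (a : Int × Int) (t : List (Int × Int)) :
      a ∉ t → pvChunked t → pvChunked (List.replicate (k + 1) a ++ t)

theorem pv_not_mem_dropWhile (a : Int × Int) : ∀ (t : List (Int × Int)),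
    t.Pairwise (fun x y => pvKey x ≤ pvKey y) → (∀ x ∈ t, pvKey a ≤ pvKey x) →
    a ∉ t.dropWhile (fun x => x == a) := by
  intro t
  induction t with
  | nil => simp
  | cons b w ih =>
    intro hp ha
    by_cases hb : (b == a) = true
    · rw [List.dropWhile_cons, if_pos hb]
      exact ih (List.pairwise_cons.mp hp).2 (fun x hx => ha x (List.mem_cons_of_mem _ hx))
    · rw [List.dropWhile_cons, if_neg hb]
      intro hmem
      rcases List.mem_cons.mp hmem with h | h
      · exact hb (by simp [h])
      · have h1 : pvKey b ≤ pvKey a := (List.pairwise_cons.mp hp).1 a h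
        have h2 : pvKey a ≤ pvKey b := ha b (List.mem_cons_self)
        exact hb (by simp [pv_key_inj (le_antisymm h1 h2).symm])

theorem pv_chunked_of_pairwise_fuel : ∀ (n : Nat) (s : List (Int × Int)), s.length ≤ n →
    s.Pairwise (fun x y => pvKey x ≤ pvKey y) → pvChunked s := by
  intro n
  induction n with
  | zero =>
    intro s hs _
    have : s = [] := List.length_eq_zero_iff.mp (Nat.le_zero.mp hs)
    simpa [this] using pvChunked.nil
  | succ n ih =>
    intro s hs hp
    cases s with
    | nil => exact pvChunked.nil
    | cons a t =>
      have hp' := List.pairwise_cons.mp hp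
      have hurep : t.takeWhile (fun x => x == a) = List.replicate (t.takeWhile (fun x => x == a)).length a := by
        apply List.eq_replicate_of_mem
        intro b hb
        simpa using List.mem_takeWhile_imp hb
      have hav : a ∉ t.dropWhile (fun x => x == a) :=
        pv_not_mem_dropWhile a t hp'.2 hp'.1
      have hcv : pvChunked (t.dropWhile (fun x => x == a)) := by
        apply ih _ _ (hp'.2.sublist (List.dropWhile_sublist _))
        have hle := (List.dropWhile_sublist (l := t) (p := fun x => x == a)).length_le
        have : t.length ≤ n := by simpa using Nat.le_of_succ_le_succ hs
        omega
      have hdec : a :: t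
          = List.replicate ((t.takeWhile (fun x => x == a)).length + 1) a ++ t.dropWhile (fun x => x == a) := by
        rw [List.replicate_succ, List.cons_append]
        conv_lhs => rw [← List.takeWhile_append_dropWhile (p := fun x => x == a) (l := t)]
        rw [← hurep]
      rw [hdec]
      exact pvChunked.cons _ a _ hav hcv

-- ---- B side: the scan counts one per block of length ≥ 2 ----

theorem pv_scan_rep_high : ∀ (m : Nat) (c j : Int) (a : Int × Int), 2 ≤ j →
    (List.replicate m a).foldl pvBScan (c, j, some a) = (c, j + m, some a) := by
  intro m
  induction m with
  | zero => intro c j a _; simp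
  | succ m ih =>
    intro c j a hj
    rw [List.replicate_succ, List.foldl_cons]
    have hstep : pvBScan (c, j, some a) a = (c, j + 1, some a) := by
      have hne : ¬ (j + 1 = 2) := by omega
      simp [pvBScan, hne]
    rw [hstep, ih c (j + 1) a (by omega)]
    have : j + 1 + (m : Int) = j + ((m : Nat) + 1 : Nat) := by push_cast; ring
    rw [this]

theorem pv_scan_rep_one : ∀ (m : Nat) (c : Int) (a : Int × Int),
    (List.replicate m a).foldl pvBScan (c, 1, some a)
      = (c + (if 1 ≤ m then 1 else 0), 1 + (m : Int), some a) := by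
  intro m c a
  cases m with
  | zero => simp
  | succ m =>
    rw [List.replicate_succ, List.foldl_cons]
    have hstep : pvBScan (c, 1, some a) a = (c + 1, 2, some a) := by
      simp [pvBScan]
    rw [hstep, pv_scan_rep_high m (c + 1) 2 a (by omega)]
    have h1 : (2 : Int) + m = 1 + ((m : Nat) + 1 : Nat) := by push_cast; ring
    have h2 : (1 : Nat) ≤ m + 1 := by omega
    rw [h1]
    simp [h2]

-- ---- counting on a chunked list ----

theorem pv_ofList_cons_notmem_aux (a : Int × Int) : ∀ (t s : List (Int × Int)), (∀ x ∈ t, x ≠ a) →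
    t.foldl PySem.Set.add (a :: s) = a :: t.foldl PySem.Set.add s := by
  intro t
  induction t with
  | nil => intro s _; rfl
  | cons x w ih =>
    intro s hx
    have hxa : x ≠ a := hx x (List.mem_cons_self)
    rw [List.foldl_cons, List.foldl_cons]
    have hadd : PySem.Set.add (a :: s) x = a :: PySem.Set.add s x := by
      by_cases h : PySem.Set.contains s x = true
      · simp_all [PySem.Set.add, PySem.Set.contains]
      · simp_all [PySem.Set.add, PySem.Set.contains]
    rw [hadd]
    exact ih _ (fun y hy => hx y (List.mem_cons_of_mem _ hy))

theorem pv_ofList_rep_append (k : Nat) (a : Int × Int) (t : List (Int × Int)) (hat : a ∉ t) :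
    PySem.Set.ofList (List.replicate (k + 1) a ++ t) = a :: PySem.Set.ofList t := by
  rw [PySem.Set.ofList_eq_foldl, List.foldl_append]
  have h1 : (List.replicate (k + 1) a).foldl PySem.Set.add [] = [a] := by
    rw [List.replicate_succ, List.foldl_cons]
    have h0 : (PySem.Set.add [] a : List (Int × Int)) = [a] := by
      simp [PySem.Set.add, PySem.Set.contains]
    rw [h0]
    induction k with
    | zero => rfl
    | succ k ih =>
      rw [List.replicate_succ, List.foldl_cons]
      have : (PySem.Set.add [a] a : List (Int × Int)) = [a] := by
        simp [PySem.Set.add, PySem.Set.contains]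
      rw [this, ih]
  rw [h1]
  rw [pv_ofList_cons_notmem_aux a t [] (fun x hx he => hat (he ▸ hx))]
  rw [← PySem.Set.ofList_eq_foldl]

theorem pvN_rep_append (k : Nat) (a : Int × Int) (t : List (Int × Int)) (hat : a ∉ t) :
    pvN (List.replicate (k + 1) a ++ t) = (if 1 ≤ k then 1 else 0) + pvN t := by
  unfold pvN
  rw [pv_ofList_rep_append k a t hat, List.filter_cons]
  have hca : (List.replicate (k + 1) a ++ t).count a = k + 1 := by
    rw [List.count_append, List.count_replicate, List.count_eq_zero.mpr hat]
    simp
  have hct : ∀ x ∈ PySem.Set.ofList t,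
      (decide (2 ≤ (List.replicate (k + 1) a ++ t).count x)) = (decide (2 ≤ t.count x)) := by
    intro x hx
    have hxt : x ∈ t := (PySem.Set.mem_ofList t x).mp hx
    have hxa : x ≠ a := fun he => hat (he ▸ hxt)
    have hax : ¬ ((a == x) = true) := by simp [Ne.symm hxa]
    rw [List.count_append, List.count_replicate, if_neg hax]
    simp
  rw [List.filter_congr hct, hca]
  by_cases hk : 1 ≤ k
  · have : (2 ≤ k + 1) := by omega
    simp [this, hk]
    ring
  · have : ¬ (2 ≤ k + 1) := by omega
    simp [this, hk]

theorem pvN_nil : pvN [] = 0 := by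
  simp [pvN, PySem.Set.ofList]

-- the scan over a chunked list, started on a fresh prev, returns the block count
theorem pv_scan_chunked : ∀ (s : List (Int × Int)), pvChunked s → ∀ (c r : Int) (prev : Option (Int × Int)),
    (∀ b, prev = some b → b ∉ s) →
    (s.foldl pvBScan (c, r, prev)).1 = c + pvN s := by
  intro s hch
  induction hch with
  | nil => intro c r prev _; simp [pvN_nil]
  | cons k a t hat hcht ih =>
    intro c r prev hprev
    have hmem : a ∈ List.replicate (k + 1) a ++ t := by
      apply List.mem_append_left
      exact List.mem_replicate.mpr ⟨by omega, rfl⟩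
    have hstep : pvBScan (c, r, prev) a = (c, 1, some a) := by
      cases prev with
      | none => simp [pvBScan]
      | some b =>
        have hba : a ≠ b := fun he => hprev b rfl (he ▸ hmem)
        simp [pvBScan, hba]
    rw [pvN_rep_append k a t hat]
    rw [List.replicate_succ, List.cons_append, List.foldl_cons]
    rw [hstep, List.foldl_append, pv_scan_rep_one k c a]
    rw [ih (c + if 1 ≤ k then 1 else 0) (1 + (k : Int)) (some a)
          (fun b hb => by cases hb; exact hat)]
    ring

-- pvN is invariant under permutation
theorem pv_perm_pvN {s₁ s₂ : List (Int × Int)} (h : s₁.Perm s₂) : pvN s₁ = pvN s₂ := by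
  unfold pvN
  have hfun : (fun k => decide (2 ≤ s₁.count k)) = (fun k => decide (2 ≤ s₂.count k)) := by
    funext x
    rw [h.count_eq]
  have hm : ∀ x, x ∈ PySem.Set.ofList s₁ ↔ x ∈ PySem.Set.ofList s₂ := by
    intro x
    rw [PySem.Set.mem_ofList, PySem.Set.mem_ofList]
    exact ⟨fun hx => h.mem_iff.mp hx, fun hx => h.mem_iff.mpr hx⟩
  have hperm : (PySem.Set.ofList s₁).Perm (PySem.Set.ofList s₂) :=
    (List.perm_ext_iff_of_nodup (PySem.Set.nodup_ofList _) (PySem.Set.nodup_ofList _)).mpr hm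
  rw [hfun, (hperm.filter _).length_eq]

-- B computes the number of distinct truthy points occurring more than once
theorem pv_B_char (cd : List (List (Option (Int × Int)))) :
    count_repeats_alt cd = pvN (pvPts cd) := by
  unfold count_repeats_alt
  dsimp only
  have hpts : cd.flatMap (fun row => row.filterMap id) = pvPts cd := by
    unfold pvPts
    rw [List.flatMap_def, List.filterMap_flatten]
  have hpw := pv_sorted2_pairwise (cd.flatMap (fun row => row.filterMap id))
  have hch := pv_chunked_of_pairwise_fuel
      (PySem.List.sorted2 (cd.flatMap (fun row => row.filterMap id)) Prod.fst Prod.snd).length _ le_rfl hpw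
  rw [pv_scan_chunked _ hch 0 0 none (fun b hb => by cases hb)]
  rw [pv_perm_pvN (PySem.List.sorted2_perm (cd.flatMap (fun row => row.filterMap id)) Prod.fst Prod.snd false)]
  rw [hpts]
  ring

-- ===== VERDICT (by name: the statement is the Claim_ definition above) =====
theorem count_repeats_spec : Claim_equal_count_repeats := by
  intro cd _
  unfold Spec_count_repeats
  rw [pv_A_char, pv_B_char]
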